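-- pv_equiv track=rewrite | github.com/NVIDIA/TensorRT | tools/experimental/trt-engine-explorer/trex/misc.py | _merge_keys_values
-- ===== SOURCE A (Python) =====
-- from typing import Dict, List, Tuple
-- import functools
--
-- def _merge_keys_values(
--     keys_lists: List[List],
--     values_lists: List[List],
--     empty_placeholder: object
-- ) -> Dict:
--     # Concatenate the keys lists into a set of all keys
--     all_keys = set(functools.reduce(lambda a, b: a+b, keys_lists))
--
--     # Create the stacked output dictionary, and fill missing values.
--     dicts = [dict(zip(keys, values)) for keys, values in zip(keys_lists, values_lists)]
--     result = {}
--     for key in all_keys: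
--         for d in dicts:
--             if key not in d:
--                 d[key] = empty_placeholder
--         result[key] = [d[key] for d in dicts]
--     return result
-- ===== SOURCE B (Python) =====
-- import functools
--
-- def _merge_keys_values(keys_lists, values_lists, empty_placeholder):
--     # Same key collection as before (all keys, in one set).
--     all_keys = set(functools.reduce(lambda a, b: a + b, keys_lists))
--
--     # Preallocate one placeholder slot per (keys, values) pair, then scatter
--     # each entry into its column instead of building per-pair dicts.
--     pairs = list(zip(keys_lists, values_lists))
--     n = len(pairs)
--     result = {key: [empty_placeholder] * n for key in all_keys}
--     for i, (keys, values) in enumerate(pairs):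
--         for k, v in zip(keys, values):
--             result[k][i] = v
--     return result
-- ===== Notes on version B (the rewrite author's own statement) =====
-- stated objective: faster
-- what changed: Inverts the loop nest: instead of building one dict per (keys,values) pair and then, per key, membership-testing and patching every dict before gathering a column, B preallocates a placeholder row of length n per key and scatters each (key,value) entry directly into its column slot.
import Mathlib
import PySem

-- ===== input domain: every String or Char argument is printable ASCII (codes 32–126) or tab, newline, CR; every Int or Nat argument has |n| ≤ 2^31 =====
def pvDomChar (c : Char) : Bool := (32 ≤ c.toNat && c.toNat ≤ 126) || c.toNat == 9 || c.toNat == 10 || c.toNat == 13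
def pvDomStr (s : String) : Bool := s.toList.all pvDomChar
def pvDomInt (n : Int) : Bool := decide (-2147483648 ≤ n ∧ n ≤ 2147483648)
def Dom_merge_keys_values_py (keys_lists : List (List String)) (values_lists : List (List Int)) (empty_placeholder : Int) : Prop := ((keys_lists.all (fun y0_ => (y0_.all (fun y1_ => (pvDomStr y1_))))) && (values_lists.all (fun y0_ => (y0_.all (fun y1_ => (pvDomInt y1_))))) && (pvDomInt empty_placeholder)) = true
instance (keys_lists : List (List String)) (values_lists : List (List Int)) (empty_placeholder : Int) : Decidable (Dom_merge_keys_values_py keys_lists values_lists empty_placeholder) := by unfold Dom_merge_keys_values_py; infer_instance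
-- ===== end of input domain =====

-- B inverts A's loop nest: A builds one dict per (keys,values) pair and then, per key, patches
-- every dict and gathers a column; B preallocates a placeholder row per key and scatters each
-- (key,value) entry into its column slot (measured faster in a timing run).


-- ===== PORT A =====
-- functools.reduce(lambda a, b: a + b, keys_lists); on [] Python raises TypeError (excluded by Pre_),
-- here the [] case returns [] (a junk value outside Pre_).
def pyReduceConcat (ls : List (List String)) : List String :=
  match ls with
  | [] => []
  | x :: xs => xs.foldl (fun a b => a ++ b) x

def merge_keys_values_py (keys_lists : List (List String)) (values_lists : List (List Int)) (empty_placeholder : Int) : List (String × List Int) :=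
  let all_keys : PySem.Set String := PySem.Set.ofList (pyReduceConcat keys_lists)
  let dicts : List (PySem.Dict String Int) :=
    (keys_lists.zip values_lists).map (fun p => PySem.Dict.ofList (p.1.zip p.2))
  -- for key in all_keys: patch every dict, then emit result[key] (the result dict as an assoc list)
  (all_keys.foldl
    (fun (st : List (String × List Int) × List (PySem.Dict String Int)) key =>
      let ds := st.2.map (fun d => if d.contains key then d else d.insert key empty_placeholder)
      (st.1 ++ [(key, ds.map (fun d => d.getD key empty_placeholder))], ds))
    ([], dicts)).1

-- ===== PORT B =====
def merge_keys_values_py_alt (keys_lists : List (List String)) (values_lists : List (List Int)) (empty_placeholder : Int) : List (String × List Int) :=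
  let all_keys : PySem.Set String := PySem.Set.ofList (pyReduceConcat keys_lists)
  let pairs := keys_lists.zip values_lists
  let n := pairs.length
  -- result = {key: [empty_placeholder] * n for key in all_keys}
  let result0 : List (String × List Int) := all_keys.map (fun k => (k, List.replicate n empty_placeholder))
  -- for i, (keys, values) in enumerate(pairs): for k, v in zip(keys, values): result[k][i] = v
  (PySem.List.enumerate pairs).foldl
    (fun res ip =>
      (ip.2.1.zip ip.2.2).foldl
        (fun res kv =>
          res.map (fun e => if e.1 == kv.1 then (e.1, PySem.List.pySetD e.2 ip.1 kv.2) else e))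
        res)
    result0

-- ===== PRECONDITION & SPEC =====
-- Pre_ excludes only keys_lists = [], on which A's functools.reduce raises TypeError (B raises too).
def Pre_merge_keys_values_py (keys_lists : List (List String)) (values_lists : List (List Int)) (empty_placeholder : Int) : Prop :=
  keys_lists ≠ []
instance (keys_lists : List (List String)) (values_lists : List (List Int)) (empty_placeholder : Int) : Decidable (Pre_merge_keys_values_py keys_lists values_lists empty_placeholder) := by unfold Pre_merge_keys_values_py; infer_instance

def pvWitness_merge_keys_values_py : List (List String) × List (List Int) × Int :=
  ([["a", "b"], ["b"]], [[1, 2], [3]], 0)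

def Spec_merge_keys_values_py (keys_lists : List (List String)) (values_lists : List (List Int)) (empty_placeholder : Int) (out : List (String × List Int)) : Prop := out = merge_keys_values_py_alt keys_lists values_lists empty_placeholder
instance (keys_lists : List (List String)) (values_lists : List (List Int)) (empty_placeholder : Int) (out : List (String × List Int)) : Decidable (Spec_merge_keys_values_py keys_lists values_lists empty_placeholder out) := by unfold Spec_merge_keys_values_py; infer_instance

-- ===== CLAIM (what is proved, stated in full; the proofs are below) =====
def Claim_equal_merge_keys_values_py : Prop := ∀ (keys_lists : List (List String)) (values_lists : List (List Int)) (empty_placeholder : Int), Dom_merge_keys_values_py keys_lists values_lists empty_placeholder → Pre_merge_keys_values_py keys_lists values_lists empty_placeholder → Spec_merge_keys_values_py keys_lists values_lists empty_placeholder (merge_keys_values_py keys_lists values_lists empty_placeholder)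

-- ===== LEMMAS AND PROOFS =====

-- The per-key column both sides compute: one slot per zipped pair, dict lookup with placeholder default.
def pvCol (pairs : List (List String × List Int)) (ph : Int) (k : String) : List Int :=
  pairs.map (fun p => (PySem.Dict.ofList (p.1.zip p.2)).getD k ph)

-- ---- A side ----

lemma pvMap_eq_of_forall₂ {α β γ : Type} {f : α → γ} {g : β → γ} :
    ∀ {l : List α} {l' : List β}, List.Forall₂ (fun a b => f a = g b) l l' → l.map f = l'.map g
  | _, _, List.Forall₂.nil => rfl
  | _, _, List.Forall₂.cons h t => by simp [List.map, h, pvMap_eq_of_forall₂ t]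

lemma pvPatch_getD (d : PySem.Dict String Int) (key q : String) (ph : Int) :
    (if d.contains key then d else d.insert key ph).getD q ph = d.getD q ph := by
  by_cases h : d.contains key = true
  · simp [h]
  · rw [if_neg h, PySem.Dict.getD_insert]
    by_cases hq : q = key
    · rw [if_pos hq, hq]
      exact (PySem.Dict.getD_of_not_contains d ph (by simpa using h)).symm
    · rw [if_neg hq]

lemma pvAfold (ph : Int) (keys : List String) :
    ∀ (ds ds0 : List (PySem.Dict String Int)) (acc : List (String × List Int)),
    List.Forall₂ (fun d d0 => ∀ q, d.getD q ph = d0.getD q ph) ds ds0 →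
    (keys.foldl
      (fun (st : List (String × List Int) × List (PySem.Dict String Int)) key =>
        let ds := st.2.map (fun d => if d.contains key then d else d.insert key ph)
        (st.1 ++ [(key, ds.map (fun d => d.getD key ph))], ds))
      (acc, ds)).1
    = acc ++ keys.map (fun k => (k, ds0.map (fun d => d.getD k ph))) := by
  induction keys with
  | nil => intro ds ds0 acc _; simp
  | cons key keys ih =>
    intro ds ds0 acc h
    have h' : List.Forall₂ (fun d d0 => ∀ q, d.getD q ph = d0.getD q ph)
        (ds.map (fun d => if d.contains key then d else d.insert key ph)) ds0 := by
      refine (List.forall₂_map_left_iff).2 (h.imp ?_)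
      intro d d0 hd q
      rw [pvPatch_getD]; exact hd q
    have hcol : (ds.map (fun d => if d.contains key then d else d.insert key ph)).map
        (fun d => d.getD key ph) = ds0.map (fun d => d.getD key ph) :=
      pvMap_eq_of_forall₂ (h'.imp (fun _ _ hd => hd key))
    simp only [List.foldl_cons]
    rw [ih _ ds0 _ h']
    simp [hcol]

lemma pvA_eq (keys_lists : List (List String)) (values_lists : List (List Int)) (ph : Int) :
    merge_keys_values_py keys_lists values_lists ph
    = (PySem.Set.ofList (pyReduceConcat keys_lists)).map
        (fun k => (k, pvCol (keys_lists.zip values_lists) ph k)) := by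
  unfold merge_keys_values_py
  rw [pvAfold ph _ _ _ [] (List.forall₂_same.2 (fun d _ q => rfl))]
  simp [pvCol, List.map_map, Function.comp]

-- ---- B side ----

-- last value for key k in an entry list, starting from a
def pvLast (k : String) (L : List (String × Int)) (a : Int) : Int :=
  L.foldl (fun a kv => if kv.1 == k then kv.2 else a) a

lemma pvLast_eq_getD (k : String) (L : List (String × Int)) :
    ∀ (d : PySem.Dict String Int) (ph : Int),
    (L.foldl (fun d kv => d.insert kv.1 kv.2) d).getD k ph = pvLast k L (d.getD k ph) := by
  induction L with
  | nil => intro d ph; rfl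
  | cons kv L ih =>
    intro d ph
    simp only [List.foldl_cons, pvLast, ih]
    congr 1
    rw [PySem.Dict.getD_insert]
    simp only [beq_iff_eq]
    split_ifs with h1 h2 h2 <;> first | rfl | (exact absurd h1.symm h2) | (exact absurd h2.symm h1)

lemma pvSet_append (pre : List Int) (a b : Int) (rest : List Int) :
    (pre ++ a :: rest).set pre.length b = pre ++ b :: rest := by
  induction pre with
  | nil => rfl
  | cons x pre ih => simp [ih]

lemma pvFoldSet (k : String) (L : List (String × Int)) :
    ∀ (pre : List Int) (a : Int) (rest : List Int),
    L.foldl (fun l kv => if kv.1 == k then l.set pre.length kv.2 else l) (pre ++ a :: rest)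
    = pre ++ (pvLast k L a) :: rest := by
  induction L with
  | nil => intro pre a rest; rfl
  | cons kv L ih =>
    intro pre a rest
    simp only [List.foldl_cons, pvLast, List.foldl_cons]
    by_cases h : (kv.1 == k) = true
    · simp only [h, if_true, pvSet_append]
      exact ih pre kv.2 rest
    · simp only [h]
      exact ih pre a rest

-- the inner scatter loop acting on an assoc list of shape keylist.map (k, g k)
lemma pvBinner (u : List Int → (String × Int) → List Int) (L : List (String × Int)) :
    ∀ (keylist : List String) (g : String → List Int),
    L.foldl (fun res kv => res.map (fun e => if e.1 == kv.1 then (e.1, u e.2 kv) else e))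
      (keylist.map (fun k => (k, g k)))
    = keylist.map (fun k => (k, L.foldl (fun l kv => if kv.1 == k then u l kv else l) (g k))) := by
  induction L with
  | nil => intro keylist g; rfl
  | cons kv L ih =>
    intro keylist g
    simp only [List.foldl_cons]
    have : (keylist.map (fun k => (k, g k))).map
        (fun e => if e.1 == kv.1 then (e.1, u e.2 kv) else e)
      = keylist.map (fun k => (k, if kv.1 == k then u (g k) kv else g k)) := by
      rw [List.map_map]
      refine List.map_congr_left (fun k _ => ?_)
      simp only [Function.comp]
      by_cases h : k = kv.1
      · subst h; simp
      · simp [h, Ne.symm h]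
    rw [this, ih keylist (fun k => if kv.1 == k then u (g k) kv else g k)]

-- effect of scattering the remaining pairs, column by column, at consecutive indices
def pvScat (k : String) (ps : List (List String × List Int)) (i : Nat) (l : List Int) : List Int :=
  match ps with
  | [] => l
  | p :: ps =>
    pvScat k ps (i + 1)
      ((p.1.zip p.2).foldl (fun l kv => if kv.1 == k then l.set i kv.2 else l) l)

lemma pvBouter (ps : List (List String × List Int)) :
    ∀ (j : Nat) (keylist : List String) (g : String → List Int),
    (PySem.List.enumerate ps (j : Int)).foldl
      (fun res ip =>
        (ip.2.1.zip ip.2.2).foldl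
          (fun res kv =>
            res.map (fun e => if e.1 == kv.1 then (e.1, PySem.List.pySetD e.2 ip.1 kv.2) else e))
          res)
      (keylist.map (fun k => (k, g k)))
    = keylist.map (fun k => (k, pvScat k ps j (g k))) := by
  induction ps with
  | nil => intro j keylist g; rfl
  | cons p ps ih =>
    intro j keylist g
    rw [PySem.List.enumerate_cons]
    simp only [List.foldl_cons]
    rw [pvBinner (fun l kv => PySem.List.pySetD l (j : Int) kv.2) (p.1.zip p.2) keylist g]
    have hj1 : ((j : Int) + 1) = ((j + 1 : Nat) : Int) := by push_cast; ring
    rw [hj1, ih (j + 1) keylist _]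
    refine List.map_congr_left (fun k _ => ?_)
    simp [pvScat, PySem.List.pySetD_natCast]

lemma pvScat_eq (k : String) (ph : Int) (ps : List (List String × List Int)) :
    ∀ (pre : List Int),
    pvScat k ps pre.length (pre ++ List.replicate ps.length ph) = pre ++ pvCol ps ph k := by
  induction ps with
  | nil => intro pre; simp [pvScat, pvCol]
  | cons p ps ih =>
    intro pre
    simp only [pvScat, List.length_cons, List.replicate_succ]
    rw [pvFoldSet k (p.1.zip p.2) pre ph (List.replicate ps.length ph)]
    have := ih (pre ++ [pvLast k (p.1.zip p.2) ph])
    simp only [List.length_append, List.length_cons, List.length_nil, List.append_assoc,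
      List.cons_append, List.nil_append] at this ⊢
    rw [this]
    have hd : (PySem.Dict.ofList (p.1.zip p.2)).getD k ph = pvLast k (p.1.zip p.2) ph := by
      have := pvLast_eq_getD k (p.1.zip p.2) PySem.Dict.empty ph
      simpa [PySem.Dict.ofList, PySem.Dict.getD_empty] using this
    simp [pvCol, hd]

lemma pvB_eq (keys_lists : List (List String)) (values_lists : List (List Int)) (ph : Int) :
    merge_keys_values_py_alt keys_lists values_lists ph
    = (PySem.Set.ofList (pyReduceConcat keys_lists)).map
        (fun k => (k, pvCol (keys_lists.zip values_lists) ph k)) := by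
  have hdef : merge_keys_values_py_alt keys_lists values_lists ph
      = (PySem.List.enumerate (keys_lists.zip values_lists) ((0 : Nat) : Int)).foldl
          (fun res ip =>
            (ip.2.1.zip ip.2.2).foldl
              (fun res kv =>
                res.map (fun e => if e.1 == kv.1 then (e.1, PySem.List.pySetD e.2 ip.1 kv.2) else e))
              res)
          ((PySem.Set.ofList (pyReduceConcat keys_lists)).map
            (fun k => (k, List.replicate (keys_lists.zip values_lists).length ph))) := rfl
  rw [hdef, pvBouter (keys_lists.zip values_lists) 0 _
      (fun _ => List.replicate (keys_lists.zip values_lists).length ph)]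
  refine List.map_congr_left (fun k _ => ?_)
  have h2 := pvScat_eq k ph (keys_lists.zip values_lists) []
  simpa using h2

-- ===== VERDICT (by name: the statement is the Claim_ definition above) =====
theorem merge_keys_values_py_spec : Claim_equal_merge_keys_values_py := by
  intro keys_lists values_lists ph _ _
  unfold Spec_merge_keys_values_py
  rw [pvA_eq, pvB_eq]
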